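-- pv_equiv track=rewrite | github.com/vicentini-edoardo/Multilayer_anisotropic_Transfer_Matrix | src/multilayer_atm/ui/layer_builder.py | stale_layer_widget_keys
-- ===== SOURCE A (Python) =====
-- from typing import Dict, Iterable, List, Mapping, Sequence
--
-- LAYER_WIDGET_KEY_PREFIXES: Sequence[str] = (
--     "sel_",
--     "del_",
--     "move_up_",
--     "move_down_",
--     "mat_",
--     "thk_",
--     "a_",
--     "b_",
--     "g_",
--     "dop_",
--     "wp_",
--     "gp_",
-- )
--
-- def stale_layer_widget_keys(state_keys: Iterable[str], active_layer_ids: Iterable[str]) -> List[str]: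
--     active_ids = {str(layer_id) for layer_id in active_layer_ids}
--     stale: List[str] = []
--     for key in state_keys:
--         for prefix in LAYER_WIDGET_KEY_PREFIXES:
--             if not key.startswith(prefix):
--                 continue
--             suffix = key[len(prefix) :]
--             if suffix.isdigit() or suffix not in active_ids:
--                 stale.append(key)
--             break
--     return stale
-- ===== SOURCE B (Python) =====
-- _STEMS = {"sel", "del", "mat", "thk", "a", "b", "g", "dop", "wp", "gp"}
--
--
-- def _layer_suffix(key):
--     i = key.find("_")
--     if i < 0:
--         return None
--     stem = key[:i]
--     rest = key[i + 1:]
--     if stem in _STEMS: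
--         return rest
--     if stem == "move":
--         j = rest.find("_")
--         if j >= 0 and rest[:j] in ("up", "down"):
--             return rest[j + 1:]
--     return None
--
--
-- def stale_layer_widget_keys(state_keys, active_layer_ids):
--     active_ids = {str(layer_id) for layer_id in active_layer_ids}
--     stale = []
--     for key in state_keys:
--         suffix = _layer_suffix(key)
--         if suffix is not None and (suffix.isdigit() or suffix not in active_ids):
--             stale.append(key)
--     return stale
-- ===== Notes on version B (the rewrite author's own statement) =====
-- stated objective: faster
-- what changed: Instead of scanning the 12 widget-key prefixes per key, B splits each key at its first underscore and classifies the stem by a single set lookup (with a second split for the two move_* prefixes), valid because the prefix list is prefix-free.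
import Mathlib
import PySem

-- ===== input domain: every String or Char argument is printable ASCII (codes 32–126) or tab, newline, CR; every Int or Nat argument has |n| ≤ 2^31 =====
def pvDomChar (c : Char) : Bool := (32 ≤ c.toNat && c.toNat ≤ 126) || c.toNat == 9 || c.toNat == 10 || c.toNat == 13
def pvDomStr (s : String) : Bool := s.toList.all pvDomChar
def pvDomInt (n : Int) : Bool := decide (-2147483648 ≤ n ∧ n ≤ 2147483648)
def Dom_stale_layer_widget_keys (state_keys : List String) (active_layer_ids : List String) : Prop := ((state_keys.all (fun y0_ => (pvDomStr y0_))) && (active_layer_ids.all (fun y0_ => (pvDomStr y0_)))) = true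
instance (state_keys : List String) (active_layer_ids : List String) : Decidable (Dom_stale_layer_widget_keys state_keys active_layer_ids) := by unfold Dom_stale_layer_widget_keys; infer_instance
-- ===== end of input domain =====

-- B replaces A's 12-prefix scan per key by splitting the key at its first underscore and
-- classifying the stem with one set lookup (valid because the prefix list is prefix-free): an alternative decomposition, same results.

-- ===== PORT A =====
-- LAYER_WIDGET_KEY_PREFIXES
def pvPrefixes : List String :=
  ["sel_", "del_", "move_up_", "move_down_", "mat_", "thk_", "a_", "b_", "g_", "dop_", "wp_", "gp_"]

-- the inner 'for prefix in LAYER_WIDGET_KEY_PREFIXES' loop over one key (with its break)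
def pvAInner (active_ids : PySem.Set String) (key : String) (stale : List String) : List String → List String
  | [] => stale
  | p :: ps =>
    if PySem.Str.startswith key p = false then pvAInner active_ids key stale ps
    else
      let suffix := PySem.Str.slice key (some (PySem.Str.len p)) none
      if PySem.Str.strIsdigit suffix || !(PySem.Set.contains active_ids suffix) then stale ++ [key]
      else stale

def stale_layer_widget_keys (state_keys : List String) (active_layer_ids : List String) : List String :=
  -- str(layer_id) is the identity here: the ids are already str
  let active_ids := PySem.Set.ofList active_layer_ids
  state_keys.foldl (fun stale key => pvAInner active_ids key stale pvPrefixes) []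

-- ===== PORT B =====
-- _STEMS
def pvStems : PySem.Set String :=
  PySem.Set.ofList ["sel", "del", "mat", "thk", "a", "b", "g", "dop", "wp", "gp"]

-- _layer_suffix
def pvLayerSuffix (key : String) : Option String :=
  let i := PySem.Str.find key "_"
  if i < 0 then none
  else
    let stem := PySem.Str.slice key none (some i)
    let rest := PySem.Str.slice key (some (i + 1)) none
    if PySem.Set.contains pvStems stem then some rest
    else if stem = "move" then
      let j := PySem.Str.find rest "_"
      if 0 ≤ j ∧ (PySem.Str.slice rest none (some j) = "up" ∨ PySem.Str.slice rest none (some j) = "down")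
      then some (PySem.Str.slice rest (some (j + 1)) none)
      else none
    else none

def stale_layer_widget_keys_alt (state_keys : List String) (active_layer_ids : List String) : List String :=
  let active_ids := PySem.Set.ofList active_layer_ids
  state_keys.foldl (fun stale key =>
    match pvLayerSuffix key with
    | none => stale
    | some suffix =>
      if PySem.Str.strIsdigit suffix || !(PySem.Set.contains active_ids suffix) then stale ++ [key]
      else stale) []

-- ===== PRECONDITION & SPEC =====
def Spec_stale_layer_widget_keys (state_keys : List String) (active_layer_ids : List String) (out : List String) : Prop := out = stale_layer_widget_keys_alt state_keys active_layer_ids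
instance (state_keys : List String) (active_layer_ids : List String) (out : List String) : Decidable (Spec_stale_layer_widget_keys state_keys active_layer_ids out) := by unfold Spec_stale_layer_widget_keys; infer_instance

-- ===== CLAIM (what is proved, stated in full; the proofs are below) =====
def Claim_equal_stale_layer_widget_keys : Prop := ∀ (state_keys : List String) (active_layer_ids : List String), Dom_stale_layer_widget_keys state_keys active_layer_ids → Spec_stale_layer_widget_keys state_keys active_layer_ids (stale_layer_widget_keys state_keys active_layer_ids)

-- ===== LEMMAS AND PROOFS =====

-- A's inner loop, abstracted: the suffix of the first matching prefix (or none)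
def pvFirstOf (key : String) : List String → Option String
  | [] => none
  | p :: ps =>
    if PySem.Str.startswith key p then some (PySem.Str.slice key (some (PySem.Str.len p)) none)
    else pvFirstOf key ps

lemma pvAInner_eq_first (active_ids : PySem.Set String) (key : String) (stale : List String)
    (ps : List String) :
    pvAInner active_ids key stale ps =
      match pvFirstOf key ps with
      | none => stale
      | some suffix =>
        if PySem.Str.strIsdigit suffix || !(PySem.Set.contains active_ids suffix) then stale ++ [key]
        else stale := by
  induction ps with
  | nil => rfl
  | cons p ps ih =>
    cases hb : PySem.Chars.startswith key.toList p.toList <;>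
      simp [pvAInner, pvFirstOf, hb, ih]

lemma pv_singleton_prefix_iff (c : Char) (xs : List Char) : [c] <+: xs ↔ xs.head? = some c := by
  cases xs with
  | nil => simp
  | cons a l => simp [List.cons_prefix_cons, eq_comm]

lemma pv_find_singleton (cs : List Char) (c : Char) :
    PySem.Chars.find cs [c] = if c ∈ cs then (cs.idxOf c : Int) else -1 := by
  by_cases hc : c ∈ cs
  · have hinf : [c] <:+: cs := by
      obtain ⟨s, t, rfl⟩ := List.append_of_mem hc
      exact ⟨s, t, by simp⟩
    have h0 : 0 ≤ PySem.Chars.find cs [c] := (PySem.Chars.find_nonneg_iff _ _).2 hinf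
    obtain ⟨hpre, hmin⟩ := PySem.Chars.find_spec h0
    have hat : cs[(PySem.Chars.find cs [c]).toNat]? = some c := by
      rw [← List.head?_drop]
      exact (pv_singleton_prefix_iff _ _).1 hpre
    have hidx : cs[cs.idxOf c]? = some c := List.getElem?_idxOf hc
    have h2 : (PySem.Chars.find cs [c]).toNat ≤ cs.idxOf c := by
      by_contra hlt
      exact hmin _ (Nat.lt_of_not_le hlt)
        ((pv_singleton_prefix_iff _ _).2 (by rw [List.head?_drop]; exact hidx))
    have h1 : cs.idxOf c ≤ (PySem.Chars.find cs [c]).toNat := by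
      have hmem2 : c ∈ cs.take ((PySem.Chars.find cs [c]).toNat + 1) := by
        apply List.mem_of_getElem? (i := (PySem.Chars.find cs [c]).toNat)
        rw [List.getElem?_take_of_lt (by omega)]
        exact hat
      have := (List.mem_take_iff_idxOf_lt hc).1 hmem2
      omega
    have heq : (PySem.Chars.find cs [c]).toNat = cs.idxOf c := le_antisymm h2 h1
    rw [if_pos hc, ← heq]
    exact (Int.toNat_of_nonneg h0).symm
  · have : ¬ [c] <:+: cs := fun h => hc (h.subset (by simp))
    rw [if_neg hc]
    exact (PySem.Chars.find_eq_neg_one_iff _ _).2 this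

lemma pv_slice_to_toList (key : String) (n : Nat) :
    (PySem.Str.slice key none (some (n : Int))).toList = key.toList.take n := by
  rw [PySem.Str.toList_slice, PySem.Chars.slice_eq_listSlice, PySem.List.slice_to_natCast]

lemma pv_slice_from_toList (key : String) (n : Nat) :
    (PySem.Str.slice key (some (n : Int)) none).toList = key.toList.drop n := by
  rw [PySem.Str.toList_slice, PySem.Chars.slice_eq_listSlice, PySem.List.slice_from_natCast]

lemma pv_find_decomp (key : String) (xs t : List Char)
    (hk : key.toList = xs ++ '_' :: t) (hus : '_' ∉ xs) :
    PySem.Str.find key "_" = (xs.length : Int) := by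
  have h_ : ("_" : String).toList = ['_'] := by decide
  rw [PySem.Str.find_eq, h_, pv_find_singleton]
  have hm : '_' ∈ key.toList := by rw [hk]; simp
  rw [if_pos hm, hk, List.idxOf_append_of_notMem hus]
  simp

lemma pv_find_pos_decomp (key : String) (h0 : 0 ≤ PySem.Str.find key "_") :
    ∃ xs t, PySem.Str.find key "_" = (xs.length : Int) ∧ key.toList = xs ++ '_' :: t := by
  have h_ : ("_" : String).toList = ['_'] := by decide
  rw [PySem.Str.find_eq, h_, pv_find_singleton] at h0 ⊢
  by_cases hm : '_' ∈ key.toList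
  · rw [if_pos hm]
    have hlt : key.toList.idxOf '_' < key.toList.length := List.idxOf_lt_length_of_mem hm
    have hget : key.toList[key.toList.idxOf '_'] = '_' := by
      have h1 := List.getElem?_idxOf hm
      rw [List.getElem?_eq_getElem hlt] at h1
      exact Option.some.inj h1
    refine ⟨key.toList.take (key.toList.idxOf '_'), key.toList.drop (key.toList.idxOf '_' + 1),
      ?_, ?_⟩
    · rw [List.length_take, Nat.min_eq_left hlt.le]
    · conv_lhs => rw [← List.take_append_drop (key.toList.idxOf '_') key.toList]
      rw [List.drop_eq_getElem_cons hlt, hget]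
  · rw [if_neg hm] at h0; omega

lemma pv_stem_eq (keyS S : String) (t : List Char) (hk : keyS.toList = S.toList ++ '_' :: t) :
    PySem.Str.slice keyS none (some (S.toList.length : Int)) = S := by
  apply String.toList_inj.1
  rw [pv_slice_to_toList, hk]
  simp

lemma pv_rest_toList (keyS : String) (xs t : List Char) (hk : keyS.toList = xs ++ '_' :: t) :
    (PySem.Str.slice keyS (some ((xs.length : Int) + 1)) none).toList = t := by
  have h1 : ((xs.length : Int) + 1) = ((xs.length + 1 : Nat) : Int) := by push_cast; ring
  rw [h1, pv_slice_from_toList, hk]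
  simp [List.drop_append]

lemma pv_suffix_stem (key S : String) (t : List Char)
    (hmem : PySem.Set.contains pvStems S = true)
    (hk : key.toList = S.toList ++ '_' :: t) (hus : '_' ∉ S.toList) :
    ∃ r, pvLayerSuffix key = some r ∧ r.toList = t := by
  have hfind : PySem.Str.find key "_" = (S.toList.length : Int) := pv_find_decomp key _ _ hk hus
  refine ⟨PySem.Str.slice key (some ((S.toList.length : Int) + 1)) none, ?_,
    pv_rest_toList key _ _ hk⟩
  simp only [pvLayerSuffix, hfind]
  rw [if_neg (by omega), pv_stem_eq key S t hk, if_pos hmem]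

lemma pv_suffix_move (key midS : String) (t : List Char)
    (hmid : midS = "up" ∨ midS = "down") (hus : '_' ∉ midS.toList)
    (hk : key.toList = ("move" : String).toList ++ '_' :: (midS.toList ++ '_' :: t)) :
    ∃ r, pvLayerSuffix key = some r ∧ r.toList = t := by
  have hfind : PySem.Str.find key "_" = (("move" : String).toList.length : Int) :=
    pv_find_decomp key _ _ hk (by decide)
  have hrl := pv_rest_toList key ("move" : String).toList _ hk
  have hjfind := pv_find_decomp _ _ _ hrl hus
  refine ⟨_, ?_, pv_rest_toList _ _ _ hrl⟩
  simp only [pvLayerSuffix, hfind]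
  rw [if_neg (by omega), pv_stem_eq key "move" _ hk, if_neg (by decide), if_pos rfl]
  simp only [hjfind]
  rw [if_pos ⟨by omega, by rw [pv_stem_eq _ midS _ hrl]; exact hmid⟩]

-- the core fact: A's first-matching-prefix suffix equals B's split-based suffix

lemma pv_pos_stem (key S p : String) (hb : PySem.Str.startswith key p = true)
    (hps : p.toList = S.toList ++ ['_'])
    (hmem : PySem.Set.contains pvStems S = true) (hus : '_' ∉ S.toList)
    (hlen : PySem.Str.len p = (S.toList.length : Int) + 1) :
    some (PySem.Str.slice key (some (PySem.Str.len p)) none) = pvLayerSuffix key := by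
  rw [PySem.Str.startswith_eq] at hb
  obtain ⟨t, ht⟩ := (PySem.Chars.startswith_iff _ _).1 hb
  have hk : key.toList = S.toList ++ '_' :: t := by rw [← ht, hps]; simp
  obtain ⟨r, hB, hrt⟩ := pv_suffix_stem key S t hmem hk hus
  rw [hB]
  exact congrArg some (String.toList_inj.1 (by rw [hrt, hlen]; exact pv_rest_toList key _ _ hk))

lemma pv_pos_move (key midS p : String) (hb : PySem.Str.startswith key p = true)
    (hmid : midS = "up" ∨ midS = "down") (hus : '_' ∉ midS.toList)
    (hps : p.toList = ("move" : String).toList ++ '_' :: (midS.toList ++ ['_']))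
    (hlen : PySem.Str.len p
      = (((("move" : String).toList ++ '_' :: midS.toList).length : Nat) : Int) + 1) :
    some (PySem.Str.slice key (some (PySem.Str.len p)) none) = pvLayerSuffix key := by
  rw [PySem.Str.startswith_eq] at hb
  obtain ⟨t, ht⟩ := (PySem.Chars.startswith_iff _ _).1 hb
  have hk : key.toList = ("move" : String).toList ++ '_' :: (midS.toList ++ '_' :: t) := by
    rw [← ht, hps]; simp
  obtain ⟨r, hB, hrt⟩ := pv_suffix_move key midS t hmid hus hk
  rw [hB]
  have hk' : key.toList = (("move" : String).toList ++ '_' :: midS.toList) ++ '_' :: t := by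
    rw [hk]; simp
  exact congrArg some (String.toList_inj.1 (by rw [hrt, hlen]; exact pv_rest_toList key _ _ hk'))

lemma pv_sw_true' (cs pl t : List Char) (hcs : cs = pl ++ t) :
    PySem.Chars.startswith cs pl = true :=
  (PySem.Chars.startswith_iff _ _).2 ⟨t, by rw [hcs]⟩

lemma pv_core (key : String) : pvFirstOf key pvPrefixes = pvLayerSuffix key := by
  cases hb1 : PySem.Chars.startswith key.toList (['s','e','l','_'] : List Char) with
  | true =>
    rw [← pv_pos_stem key "sel" "sel_" (by simpa using hb1) (by decide) (by decide) (by decide) (by decide)]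
    simp [pvFirstOf, pvPrefixes, hb1]
  | false =>
    cases hb2 : PySem.Chars.startswith key.toList (['d','e','l','_'] : List Char) with
    | true =>
      rw [← pv_pos_stem key "del" "del_" (by simpa using hb2) (by decide) (by decide) (by decide) (by decide)]
      simp [pvFirstOf, pvPrefixes, hb1, hb2]
    | false =>
      cases hb3 : PySem.Chars.startswith key.toList (['m','o','v','e','_','u','p','_'] : List Char) with
      | true =>
        rw [← pv_pos_move key "up" "move_up_" (by simpa using hb3) (Or.inl rfl) (by decide) (by decide) (by decide)]
        simp [pvFirstOf, pvPrefixes, hb1, hb2, hb3]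
      | false =>
        cases hb4 : PySem.Chars.startswith key.toList (['m','o','v','e','_','d','o','w','n','_'] : List Char) with
        | true =>
          rw [← pv_pos_move key "down" "move_down_" (by simpa using hb4) (Or.inr rfl) (by decide) (by decide) (by decide)]
          simp [pvFirstOf, pvPrefixes, hb1, hb2, hb3, hb4]
        | false =>
          cases hb5 : PySem.Chars.startswith key.toList (['m','a','t','_'] : List Char) with
          | true =>
            rw [← pv_pos_stem key "mat" "mat_" (by simpa using hb5) (by decide) (by decide) (by decide) (by decide)]
            simp [pvFirstOf, pvPrefixes, hb1, hb2, hb3, hb4, hb5]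
          | false =>
            cases hb6 : PySem.Chars.startswith key.toList (['t','h','k','_'] : List Char) with
            | true =>
              rw [← pv_pos_stem key "thk" "thk_" (by simpa using hb6) (by decide) (by decide) (by decide) (by decide)]
              simp [pvFirstOf, pvPrefixes, hb1, hb2, hb3, hb4, hb5, hb6]
            | false =>
              cases hb7 : PySem.Chars.startswith key.toList (['a','_'] : List Char) with
              | true =>
                rw [← pv_pos_stem key "a" "a_" (by simpa using hb7) (by decide) (by decide) (by decide) (by decide)]
                simp [pvFirstOf, pvPrefixes, hb1, hb2, hb3, hb4, hb5, hb6, hb7]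
              | false =>
                cases hb8 : PySem.Chars.startswith key.toList (['b','_'] : List Char) with
                | true =>
                  rw [← pv_pos_stem key "b" "b_" (by simpa using hb8) (by decide) (by decide) (by decide) (by decide)]
                  simp [pvFirstOf, pvPrefixes, hb1, hb2, hb3, hb4, hb5, hb6, hb7, hb8]
                | false =>
                  cases hb9 : PySem.Chars.startswith key.toList (['g','_'] : List Char) with
                  | true =>
                    rw [← pv_pos_stem key "g" "g_" (by simpa using hb9) (by decide) (by decide) (by decide) (by decide)]
                    simp [pvFirstOf, pvPrefixes, hb1, hb2, hb3, hb4, hb5, hb6, hb7, hb8, hb9]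
                  | false =>
                    cases hb10 : PySem.Chars.startswith key.toList (['d','o','p','_'] : List Char) with
                    | true =>
                      rw [← pv_pos_stem key "dop" "dop_" (by simpa using hb10) (by decide) (by decide) (by decide) (by decide)]
                      simp [pvFirstOf, pvPrefixes, hb1, hb2, hb3, hb4, hb5, hb6, hb7, hb8, hb9, hb10]
                    | false =>
                      cases hb11 : PySem.Chars.startswith key.toList (['w','p','_'] : List Char) with
                      | true =>
                        rw [← pv_pos_stem key "wp" "wp_" (by simpa using hb11) (by decide) (by decide) (by decide) (by decide)]
                        simp [pvFirstOf, pvPrefixes, hb1, hb2, hb3, hb4, hb5, hb6, hb7, hb8, hb9, hb10, hb11]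
                      | false =>
                        cases hb12 : PySem.Chars.startswith key.toList (['g','p','_'] : List Char) with
                        | true =>
                          rw [← pv_pos_stem key "gp" "gp_" (by simpa using hb12) (by decide) (by decide) (by decide) (by decide)]
                          simp [pvFirstOf, pvPrefixes, hb1, hb2, hb3, hb4, hb5, hb6, hb7, hb8, hb9, hb10, hb11, hb12]
                        | false =>
                          have hA : pvFirstOf key pvPrefixes = none := by
                            simp [pvFirstOf, pvPrefixes, hb1, hb2, hb3, hb4, hb5, hb6, hb7, hb8, hb9, hb10, hb11, hb12]
                          rw [hA]
                          by_cases hneg : PySem.Str.find key "_" < 0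
                          · simp only [pvLayerSuffix]; rw [if_pos hneg]
                          · obtain ⟨xs, t, hfind, hcs⟩ := pv_find_pos_decomp key (by omega)
                            simp only [pvLayerSuffix, hfind]
                            rw [if_neg (by omega)]
                            have hxs : ∀ (S : String), PySem.Str.slice key none (some ((xs.length : Int))) = S → xs = S.toList := by
                              intro S hS
                              have h' := congrArg String.toList hS
                              rw [pv_slice_to_toList, hcs] at h'
                              simpa [List.take_left] using h'
                            by_cases hcont : PySem.Set.contains pvStems (PySem.Str.slice key none (some ((xs.length : Int)))) = true
                            · exfalso
                              have hd : PySem.Str.slice key none (some ((xs.length : Int))) = "sel" ∨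
                                  PySem.Str.slice key none (some ((xs.length : Int))) = "del" ∨
                                  PySem.Str.slice key none (some ((xs.length : Int))) = "mat" ∨
                                  PySem.Str.slice key none (some ((xs.length : Int))) = "thk" ∨
                                  PySem.Str.slice key none (some ((xs.length : Int))) = "a" ∨
                                  PySem.Str.slice key none (some ((xs.length : Int))) = "b" ∨
                                  PySem.Str.slice key none (some ((xs.length : Int))) = "g" ∨
                                  PySem.Str.slice key none (some ((xs.length : Int))) = "dop" ∨
                                  PySem.Str.slice key none (some ((xs.length : Int))) = "wp" ∨
                                  PySem.Str.slice key none (some ((xs.length : Int))) = "gp" := by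
                                have hd0 := hcont
                                simp [pvStems, PySem.Set.contains, PySem.Set.ofList, PySem.Set.add, PySem.Set.empty] at hd0
                                tauto
                              rcases hd with h|h|h|h|h|h|h|h|h|h
                              · have hcs2 : key.toList = (['s','e','l','_'] : List Char) ++ t := by
                                  rw [hcs, hxs _ h]; simp
                                have hsw := pv_sw_true' key.toList _ t hcs2
                                rw [hsw] at hb1
                                exact Bool.noConfusion hb1
                              · have hcs2 : key.toList = (['d','e','l','_'] : List Char) ++ t := by
                                  rw [hcs, hxs _ h]; simp
                                have hsw := pv_sw_true' key.toList _ t hcs2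
                                rw [hsw] at hb2
                                exact Bool.noConfusion hb2
                              · have hcs2 : key.toList = (['m','a','t','_'] : List Char) ++ t := by
                                  rw [hcs, hxs _ h]; simp
                                have hsw := pv_sw_true' key.toList _ t hcs2
                                rw [hsw] at hb5
                                exact Bool.noConfusion hb5
                              · have hcs2 : key.toList = (['t','h','k','_'] : List Char) ++ t := by
                                  rw [hcs, hxs _ h]; simp
                                have hsw := pv_sw_true' key.toList _ t hcs2
                                rw [hsw] at hb6
                                exact Bool.noConfusion hb6
                              · have hcs2 : key.toList = (['a','_'] : List Char) ++ t := by
                                  rw [hcs, hxs _ h]; simp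
                                have hsw := pv_sw_true' key.toList _ t hcs2
                                rw [hsw] at hb7
                                exact Bool.noConfusion hb7
                              · have hcs2 : key.toList = (['b','_'] : List Char) ++ t := by
                                  rw [hcs, hxs _ h]; simp
                                have hsw := pv_sw_true' key.toList _ t hcs2
                                rw [hsw] at hb8
                                exact Bool.noConfusion hb8
                              · have hcs2 : key.toList = (['g','_'] : List Char) ++ t := by
                                  rw [hcs, hxs _ h]; simp
                                have hsw := pv_sw_true' key.toList _ t hcs2
                                rw [hsw] at hb9
                                exact Bool.noConfusion hb9
                              · have hcs2 : key.toList = (['d','o','p','_'] : List Char) ++ t := by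
                                  rw [hcs, hxs _ h]; simp
                                have hsw := pv_sw_true' key.toList _ t hcs2
                                rw [hsw] at hb10
                                exact Bool.noConfusion hb10
                              · have hcs2 : key.toList = (['w','p','_'] : List Char) ++ t := by
                                  rw [hcs, hxs _ h]; simp
                                have hsw := pv_sw_true' key.toList _ t hcs2
                                rw [hsw] at hb11
                                exact Bool.noConfusion hb11
                              · have hcs2 : key.toList = (['g','p','_'] : List Char) ++ t := by
                                  rw [hcs, hxs _ h]; simp
                                have hsw := pv_sw_true' key.toList _ t hcs2
                                rw [hsw] at hb12
                                exact Bool.noConfusion hb12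
                            · rw [if_neg hcont]
                              by_cases hmv : PySem.Str.slice key none (some ((xs.length : Int))) = "move"
                              · rw [if_pos hmv]
                                have hxm : xs = ("move" : String).toList := hxs _ hmv
                                have hrt : (PySem.Str.slice key (some ((xs.length : Int) + 1)) none).toList = t :=
                                  pv_rest_toList key xs t hcs
                                by_cases hg : 0 ≤ PySem.Str.find (PySem.Str.slice key (some ((xs.length : Int) + 1)) none) "_" ∧
                                    (PySem.Str.slice (PySem.Str.slice key (some ((xs.length : Int) + 1)) none) none
                                        (some (PySem.Str.find (PySem.Str.slice key (some ((xs.length : Int) + 1)) none) "_")) = "up" ∨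
                                      PySem.Str.slice (PySem.Str.slice key (some ((xs.length : Int) + 1)) none) none
                                        (some (PySem.Str.find (PySem.Str.slice key (some ((xs.length : Int) + 1)) none) "_")) = "down")
                                · exfalso
                                  obtain ⟨hj0, hud⟩ := hg
                                  obtain ⟨ys, t2, hjfind, hrcs⟩ := pv_find_pos_decomp _ hj0
                                  have hys : ∀ (S : String),
                                      PySem.Str.slice (PySem.Str.slice key (some ((xs.length : Int) + 1)) none) none
                                        (some (PySem.Str.find (PySem.Str.slice key (some ((xs.length : Int) + 1)) none) "_")) = S →
                                      ys = S.toList := by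
                                    intro S hS
                                    have h' := congrArg String.toList hS
                                    rw [hjfind, pv_slice_to_toList, hrcs] at h'
                                    simpa [List.take_left] using h'
                                  have ht2 : t = ys ++ '_' :: t2 := by rw [← hrt]; exact hrcs
                                  rcases hud with h|h
                                  · have hy := hys _ h
                                    have hcs2 : key.toList = (['m','o','v','e','_','u','p','_'] : List Char) ++ t2 := by
                                      rw [hcs, hxm, ht2, hy, (by decide : ("move" : String).toList = ['m','o','v','e']),
                                        (by decide : ("up" : String).toList = ['u','p'])]
                                      simp
                                    have hsw := pv_sw_true' key.toList _ t2 hcs2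
                                    rw [hsw] at hb3
                                    exact Bool.noConfusion hb3
                                  · have hy := hys _ h
                                    have hcs2 : key.toList = (['m','o','v','e','_','d','o','w','n','_'] : List Char) ++ t2 := by
                                      rw [hcs, hxm, ht2, hy, (by decide : ("move" : String).toList = ['m','o','v','e']),
                                        (by decide : ("down" : String).toList = ['d','o','w','n'])]
                                      simp
                                    have hsw := pv_sw_true' key.toList _ t2 hcs2
                                    rw [hsw] at hb4
                                    exact Bool.noConfusion hb4
                                · rw [if_neg hg]
                              · rw [if_neg hmv]


theorem stale_layer_widget_keys_spec : Claim_equal_stale_layer_widget_keys := by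
  intro state_keys active_layer_ids _
  unfold Spec_stale_layer_widget_keys
  unfold stale_layer_widget_keys stale_layer_widget_keys_alt
  show List.foldl (fun stale key =>
        pvAInner (PySem.Set.ofList active_layer_ids) key stale pvPrefixes) [] state_keys =
      List.foldl (fun stale key =>
        match pvLayerSuffix key with
        | none => stale
        | some suffix =>
          if PySem.Str.strIsdigit suffix ||
              !(PySem.Set.contains (PySem.Set.ofList active_layer_ids) suffix) then stale ++ [key]
          else stale) [] state_keys
  have hfun : (fun (stale : List String) (key : String) =>
        pvAInner (PySem.Set.ofList active_layer_ids) key stale pvPrefixes) =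
      (fun (stale : List String) (key : String) =>
        match pvLayerSuffix key with
        | none => stale
        | some suffix =>
          if PySem.Str.strIsdigit suffix ||
              !(PySem.Set.contains (PySem.Set.ofList active_layer_ids) suffix) then stale ++ [key]
          else stale) := by
    funext stale key
    rw [pvAInner_eq_first, pv_core]
  rw [hfun]
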